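-- pv_equiv track=rewrite | github.com/paveleroshkinweb/algorithms | algorithms/src/problems/friends.py | get_max_happiness
-- ===== SOURCE A (Python) =====
-- def get_max_happiness(numbers, friends_capacity):
--     numbers = sorted(numbers, reverse=True)
--     friends_capacity = sorted(friends_capacity)
--     left = 0
--     total_happiness = 0
--     for friend_capacity in friends_capacity:
--         if friend_capacity == 1:
--             total_happiness += numbers[left] * 2
--             left += 1
--         elif friend_capacity == 2:
--             total_happiness += numbers[left] + numbers[left + 1]
--             left += 2
--         else:
--             total_happiness += numbers[left]
--             left += 1
--     for friend_capacity in friends_capacity: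
--         if friend_capacity > 2:
--             total_happiness += numbers[left + friend_capacity - 2]
--             left += friend_capacity - 1
--     return total_happiness
-- ===== SOURCE B (Python) =====
-- def get_max_happiness(numbers, friends_capacity):
--     nums = sorted(numbers, reverse=True)
--     caps = sorted(friends_capacity)
--     # two pointers, single fused pass: hp walks the high (greedy-front) block,
--     # lp walks the tail block reserved for the big friends' remaining numbers
--     hp = 0
--     lp = sum(2 if c == 2 else 1 for c in caps)
--     total = 0
--     for c in caps:
--         if c > 2:
--             total += nums[hp] + nums[lp + c - 2]
--             hp += 1
--             lp += c - 1
--         elif c == 2: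
--             total += nums[hp] + nums[hp + 1]
--             hp += 2
--         else:
--             total += nums[hp] * (2 if c == 1 else 1)
--             hp += 1
--     return total
-- ===== Notes on version B (the rewrite author's own statement) =====
-- stated objective: alternative
-- what changed: A's two sequential passes over the sorted capacities (sharing one reused index) are fused into a single two-pointer pass: a high pointer hp walks the greedy front while a low pointer lp, seeded by the closed-form weight sum, walks the tail block reserved for big-capacity friends.
import Mathlib
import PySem

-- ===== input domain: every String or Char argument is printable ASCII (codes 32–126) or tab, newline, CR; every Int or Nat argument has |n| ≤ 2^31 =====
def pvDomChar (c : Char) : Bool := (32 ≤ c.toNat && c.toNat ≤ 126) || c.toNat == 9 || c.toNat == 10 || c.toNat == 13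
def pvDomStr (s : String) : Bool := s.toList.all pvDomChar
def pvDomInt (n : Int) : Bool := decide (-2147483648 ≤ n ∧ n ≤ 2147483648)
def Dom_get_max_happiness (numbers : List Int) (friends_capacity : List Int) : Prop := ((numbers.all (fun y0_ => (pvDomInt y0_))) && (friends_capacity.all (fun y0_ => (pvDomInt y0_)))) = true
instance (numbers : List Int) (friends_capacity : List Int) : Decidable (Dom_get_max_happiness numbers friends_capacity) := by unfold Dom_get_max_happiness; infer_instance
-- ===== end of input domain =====

-- B fuses A's two sequential passes over the sorted capacities into ONE two-pointer pass
-- (high pointer hp, low pointer lp seeded by a closed-form weight sum); alternative decomposition, same cost.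


-- ===== PORT A =====
-- first pass of A: state (left, total)
def gmhPass1 (nums : List Int) (st : Int × Int) (c : Int) : Int × Int :=
  if c = 1 then (st.1 + 1, st.2 + PySem.List.pyGetD nums st.1 0 * 2)
  else if c = 2 then (st.1 + 2, st.2 + (PySem.List.pyGetD nums st.1 0 + PySem.List.pyGetD nums (st.1 + 1) 0))
  else (st.1 + 1, st.2 + PySem.List.pyGetD nums st.1 0)

-- second pass of A: state (left, total)
def gmhPass2 (nums : List Int) (st : Int × Int) (c : Int) : Int × Int :=
  if c > 2 then (st.1 + c - 1, st.2 + PySem.List.pyGetD nums (st.1 + c - 2) 0) else st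

def get_max_happiness (numbers : List Int) (friends_capacity : List Int) : Int :=
  let nums := PySem.List.sorted numbers (fun x => x) true
  let caps := PySem.List.sorted friends_capacity (fun x => x) false
  (caps.foldl (gmhPass2 nums) (caps.foldl (gmhPass1 nums) (0, 0))).2

-- ===== PORT B =====
-- B's fused step: state (hp, lp, total)
def gmhStep (nums : List Int) (st : Int × Int × Int) (c : Int) : Int × Int × Int :=
  if c > 2 then
    (st.1 + 1, st.2.1 + c - 1,
     st.2.2 + (PySem.List.pyGetD nums st.1 0 + PySem.List.pyGetD nums (st.2.1 + c - 2) 0))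
  else if c = 2 then
    (st.1 + 2, st.2.1, st.2.2 + (PySem.List.pyGetD nums st.1 0 + PySem.List.pyGetD nums (st.1 + 1) 0))
  else
    (st.1 + 1, st.2.1, st.2.2 + PySem.List.pyGetD nums st.1 0 * (if c = 1 then 2 else 1))

def get_max_happiness_alt (numbers : List Int) (friends_capacity : List Int) : Int :=
  let nums := PySem.List.sorted numbers (fun x => x) true
  let caps := PySem.List.sorted friends_capacity (fun x => x) false
  let lp0 := (caps.map (fun c => if c = 2 then (2 : Int) else 1)).sum
  (caps.foldl (gmhStep nums) (0, lp0, 0)).2.2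

-- ===== PRECONDITION & SPEC =====
-- Exactly the inputs on which Python A returns (otherwise IndexError: the caps need more numbers than given).
def Pre_get_max_happiness (numbers : List Int) (friends_capacity : List Int) : Prop :=
  (friends_capacity.map (fun c => if c = 2 then (2 : Int) else if c > 2 then c else 1)).sum ≤ (numbers.length : Int)
instance (numbers : List Int) (friends_capacity : List Int) : Decidable (Pre_get_max_happiness numbers friends_capacity) := by unfold Pre_get_max_happiness; infer_instance

def pvWitness_get_max_happiness : List Int × List Int := ([5, 3, 2], [1, 2])

def Spec_get_max_happiness (numbers : List Int) (friends_capacity : List Int) (out : Int) : Prop := out = get_max_happiness_alt numbers friends_capacity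
instance (numbers : List Int) (friends_capacity : List Int) (out : Int) : Decidable (Spec_get_max_happiness numbers friends_capacity out) := by unfold Spec_get_max_happiness; infer_instance

-- ===== CLAIM (what is proved, stated in full; the proofs are below) =====
def Claim_equal_get_max_happiness : Prop := ∀ (numbers : List Int) (friends_capacity : List Int), Dom_get_max_happiness numbers friends_capacity → Pre_get_max_happiness numbers friends_capacity → Spec_get_max_happiness numbers friends_capacity (get_max_happiness numbers friends_capacity)

-- ===== LEMMAS AND PROOFS =====

-- pass 1's total is additive in its starting total; the index component ignores it
theorem gmhPass1_add (nums : List Int) (caps : List Int) (h t d : Int) :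
    caps.foldl (gmhPass1 nums) (h, t + d)
      = ((caps.foldl (gmhPass1 nums) (h, t)).1, (caps.foldl (gmhPass1 nums) (h, t)).2 + d) := by
  induction caps generalizing h t with
  | nil => rfl
  | cons c cs ih =>
    simp only [List.foldl_cons, gmhPass1]
    by_cases h1 : c = 1
    · simp only [if_pos h1]
      rw [show t + d + PySem.List.pyGetD nums h 0 * 2
            = (t + PySem.List.pyGetD nums h 0 * 2) + d from by ring]
      exact ih _ _
    · by_cases h2 : c = 2
      · simp only [if_neg h1, if_pos h2]
        rw [show t + d + (PySem.List.pyGetD nums h 0 + PySem.List.pyGetD nums (h + 1) 0)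
              = (t + (PySem.List.pyGetD nums h 0 + PySem.List.pyGetD nums (h + 1) 0)) + d from by ring]
        exact ih _ _
      · simp only [if_neg h1, if_neg h2]
        rw [show t + d + PySem.List.pyGetD nums h 0
              = (t + PySem.List.pyGetD nums h 0) + d from by ring]
        exact ih _ _

-- pass 2's total is additive in its starting total
theorem gmhPass2_add (nums : List Int) (caps : List Int) (l t d : Int) :
    caps.foldl (gmhPass2 nums) (l, t + d)
      = ((caps.foldl (gmhPass2 nums) (l, t)).1, (caps.foldl (gmhPass2 nums) (l, t)).2 + d) := by
  induction caps generalizing l t with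
  | nil => rfl
  | cons c cs ih =>
    simp only [List.foldl_cons, gmhPass2]
    by_cases h3 : c > 2
    · simp only [if_pos h3]
      rw [show t + d + PySem.List.pyGetD nums (l + c - 2) 0
            = (t + PySem.List.pyGetD nums (l + c - 2) 0) + d from by ring]
      exact ih _ _
    · simp only [if_neg h3]
      exact ih _ _

-- pass 1 consumes exactly the weight sum of the capacities
theorem gmhPass1_fst (nums : List Int) (caps : List Int) (h t : Int) :
    (caps.foldl (gmhPass1 nums) (h, t)).1
      = h + (caps.map (fun c => if c = 2 then (2 : Int) else 1)).sum := by
  induction caps generalizing h t with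
  | nil => simp
  | cons c cs ih =>
    simp only [List.foldl_cons, gmhPass1, List.map_cons, List.sum_cons]
    by_cases h1 : c = 1
    · simp only [if_pos h1, if_neg (show ¬ c = 2 by omega)]
      rw [ih]; ring
    · by_cases h2 : c = 2
      · simp only [if_neg h1, if_pos h2]
        rw [ih]; ring
      · simp only [if_neg h1, if_neg h2]
        rw [ih]; ring

-- the fusion lemma: one pass of B = pass 1 then pass 2 of A, with independent pointers
theorem gmh_fuse (nums : List Int) (caps : List Int) (h0 l0 t0 : Int) :
    (caps.foldl (gmhStep nums) (h0, l0, t0)).2.2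
      = (caps.foldl (gmhPass2 nums) (l0, (caps.foldl (gmhPass1 nums) (h0, t0)).2)).2 := by
  induction caps generalizing h0 l0 t0 with
  | nil => rfl
  | cons c cs ih =>
    simp only [List.foldl_cons]
    by_cases hc3 : c > 2
    · -- big friend: both pointers advance, both reads contribute
      rw [show gmhStep nums (h0, l0, t0) c
            = (h0 + 1, l0 + c - 1,
               t0 + (PySem.List.pyGetD nums h0 0 + PySem.List.pyGetD nums (l0 + c - 2) 0))
          from by simp only [gmhStep, if_pos hc3],
          show gmhPass1 nums (h0, t0) c = (h0 + 1, t0 + PySem.List.pyGetD nums h0 0)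
          from by simp only [gmhPass1, if_neg (show ¬ c = 1 by omega), if_neg (show ¬ c = 2 by omega)],
          show gmhPass2 nums (l0, (cs.foldl (gmhPass1 nums) (h0 + 1, t0 + PySem.List.pyGetD nums h0 0)).2) c
            = (l0 + c - 1, (cs.foldl (gmhPass1 nums) (h0 + 1, t0 + PySem.List.pyGetD nums h0 0)).2
                + PySem.List.pyGetD nums (l0 + c - 2) 0)
          from by simp only [gmhPass2, if_pos hc3]]
      rw [ih, show t0 + (PySem.List.pyGetD nums h0 0 + PySem.List.pyGetD nums (l0 + c - 2) 0)
            = (t0 + PySem.List.pyGetD nums h0 0) + PySem.List.pyGetD nums (l0 + c - 2) 0 from by ring]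
      rw [gmhPass1_add, gmhPass2_add]
    · have hstep2 : ∀ t : Int, gmhPass2 nums (l0, t) c = (l0, t) := by
        intro t; simp only [gmhPass2, if_neg hc3]
      by_cases hc2 : c = 2
      · rw [show gmhStep nums (h0, l0, t0) c
              = (h0 + 2, l0, t0 + (PySem.List.pyGetD nums h0 0 + PySem.List.pyGetD nums (h0 + 1) 0))
            from by simp only [gmhStep, if_neg hc3, if_pos hc2],
            show gmhPass1 nums (h0, t0) c
              = (h0 + 2, t0 + (PySem.List.pyGetD nums h0 0 + PySem.List.pyGetD nums (h0 + 1) 0))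
            from by simp only [gmhPass1, if_neg (show ¬ c = 1 by omega), if_pos hc2],
            hstep2]
        exact ih _ _ _
      · by_cases hc1 : c = 1
        · rw [show gmhStep nums (h0, l0, t0) c
                = (h0 + 1, l0, t0 + PySem.List.pyGetD nums h0 0 * 2)
              from by simp only [gmhStep, if_neg hc3, if_neg hc2, if_pos hc1],
              show gmhPass1 nums (h0, t0) c = (h0 + 1, t0 + PySem.List.pyGetD nums h0 0 * 2)
              from by simp only [gmhPass1, if_pos hc1],
              hstep2]
          exact ih _ _ _
        · rw [show gmhStep nums (h0, l0, t0) c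
                = (h0 + 1, l0, t0 + PySem.List.pyGetD nums h0 0)
              from by simp only [gmhStep, if_neg hc3, if_neg hc2, if_neg hc1, mul_one],
              show gmhPass1 nums (h0, t0) c = (h0 + 1, t0 + PySem.List.pyGetD nums h0 0)
              from by simp only [gmhPass1, if_neg hc1, if_neg hc2],
              hstep2]
          exact ih _ _ _

-- ===== VERDICT (by name: the statement is the Claim_ definition above) =====
theorem get_max_happiness_spec : Claim_equal_get_max_happiness := by
  intro numbers friends_capacity _ _
  unfold Spec_get_max_happiness get_max_happiness get_max_happiness_alt
  simp only []
  rw [gmh_fuse]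
  have h1 : (List.foldl (gmhPass1 (PySem.List.sorted numbers (fun x => x) true)) (0, 0)
              (PySem.List.sorted friends_capacity (fun x => x) false))
      = ((List.foldl (gmhPass1 (PySem.List.sorted numbers (fun x => x) true)) (0, 0)
              (PySem.List.sorted friends_capacity (fun x => x) false)).1,
         (List.foldl (gmhPass1 (PySem.List.sorted numbers (fun x => x) true)) (0, 0)
              (PySem.List.sorted friends_capacity (fun x => x) false)).2) := rfl
  rw [h1, gmhPass1_fst]
  simp
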